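-- pv_equiv track=rewrite | github.com/STNasim/University | 1er_TUPED/Python/Promocional/GeneradorDeInformes.py | menosHuertas
-- ===== SOURCE A (Python) =====
-- def menosHuertas(datos):
--     provinciasMenores=["","",""]
--     cantidadesComparativas=[datos[0][2],datos[0][3],datos[0][4]] #Se establecen como inicial los
--                                                                  #datos de la primer provincia
--     for dato in datos:
--         #Similar a mas huertas solo que esta vez con el menor
--         if dato[2]<cantidadesComparativas[0]:
--             provinciasMenores[0]=dato[1]
--             cantidadesComparativas[0]=dato[2]
--         if dato[3]<cantidadesComparativas[1]:
--             provinciasMenores[1]=dato[1]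
--             cantidadesComparativas[1]=dato[3]
--         if dato[4]<cantidadesComparativas[2]:
--             provinciasMenores[2]=dato[1]
--             cantidadesComparativas[2]=dato[4]
--     return provinciasMenores
-- ===== SOURCE B (Python) =====
-- def menosHuertas(datos):
--     resultado = []
--     for col in (2, 3, 4):
--         min_val = datos[0][col]
--         nombre = ""
--         for dato in datos:
--             if dato[col] < min_val:
--                 nombre = dato[1]
--                 min_val = dato[col]
--         resultado.append(nombre)
--     return resultado
-- ===== Notes on version B (the rewrite author's own statement) =====
-- stated objective: simpler
-- what changed: Replaces the single pass maintaining three parallel name/min trackers by three independent per-column scans, one for each column index, appending each column's winner name.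
import Mathlib
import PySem

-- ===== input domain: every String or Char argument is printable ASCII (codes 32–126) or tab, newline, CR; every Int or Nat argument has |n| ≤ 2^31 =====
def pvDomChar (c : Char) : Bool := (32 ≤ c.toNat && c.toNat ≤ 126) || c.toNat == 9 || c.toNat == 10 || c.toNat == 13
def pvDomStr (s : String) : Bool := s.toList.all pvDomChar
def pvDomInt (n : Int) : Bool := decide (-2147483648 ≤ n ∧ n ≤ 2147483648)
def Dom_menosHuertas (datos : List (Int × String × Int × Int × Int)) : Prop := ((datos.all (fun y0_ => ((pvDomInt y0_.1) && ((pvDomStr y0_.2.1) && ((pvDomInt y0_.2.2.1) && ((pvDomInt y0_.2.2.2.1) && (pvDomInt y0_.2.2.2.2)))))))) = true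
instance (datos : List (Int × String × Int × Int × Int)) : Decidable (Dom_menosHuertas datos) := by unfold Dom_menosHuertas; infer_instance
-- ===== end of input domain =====

-- B replaces A's single pass with three parallel trackers by three independent per-column scans: simpler decomposition, same O(n) cost.


-- ===== PORT A =====
-- A's loop body: update the three name/min trackers with one row (branches in source order).
def pvStepA (st : (String × String × String) × (Int × Int × Int))
    (dato : Int × String × Int × Int × Int) :
    (String × String × String) × (Int × Int × Int) :=
  let ((n0, n1, n2), (m0, m1, m2)) := st
  let (n0, m0) := if dato.2.2.1 < m0 then (dato.2.1, dato.2.2.1) else (n0, m0)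
  let (n1, m1) := if dato.2.2.2.1 < m1 then (dato.2.1, dato.2.2.2.1) else (n1, m1)
  let (n2, m2) := if dato.2.2.2.2 < m2 then (dato.2.1, dato.2.2.2.2) else (n2, m2)
  ((n0, n1, n2), (m0, m1, m2))

def menosHuertas (datos : List (Int × String × Int × Int × Int)) : List String :=
  match datos with
  | [] => []  -- unreachable under Pre_: Python raises IndexError on datos[0]
  | d0 :: _ =>
    let st := datos.foldl pvStepA (("", "", ""), (d0.2.2.1, d0.2.2.2.1, d0.2.2.2.2))
    [st.1.1, st.1.2.1, st.1.2.2]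

-- ===== PORT B =====
-- one per-column scan: seed min from the first row, name from "", strict '<'
def pvScan (get : (Int × String × Int × Int × Int) → Int)
    (datos : List (Int × String × Int × Int × Int)) : String :=
  match datos with
  | [] => ""  -- unreachable under Pre_
  | d0 :: _ =>
    (datos.foldl (fun (p : String × Int) dato =>
        if get dato < p.2 then (dato.2.1, get dato) else p) ("", get d0)).1

def menosHuertas_alt (datos : List (Int × String × Int × Int × Int)) : List String :=
  [pvScan (fun r => r.2.2.1) datos,
   pvScan (fun r => r.2.2.2.1) datos,
   pvScan (fun r => r.2.2.2.2) datos]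

-- ===== PRECONDITION & SPEC =====
-- Pre_ excludes only the empty list, where A (and B) raise IndexError on datos[0].
def Pre_menosHuertas (datos : List (Int × String × Int × Int × Int)) : Prop := datos ≠ []
instance (datos : List (Int × String × Int × Int × Int)) : Decidable (Pre_menosHuertas datos) := by
  unfold Pre_menosHuertas; infer_instance

def pvWitness_menosHuertas : (List (Int × String × Int × Int × Int)) :=
  [(1, "a", 5, 3, 7), (2, "b", 2, 9, 7)]

def Spec_menosHuertas (datos : List (Int × String × Int × Int × Int)) (out : List String) : Prop := out = menosHuertas_alt datos
instance (datos : List (Int × String × Int × Int × Int)) (out : List String) : Decidable (Spec_menosHuertas datos out) := by unfold Spec_menosHuertas; infer_instance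

-- ===== CLAIM (what is proved, stated in full; the proofs are below) =====
def Claim_equal_menosHuertas : Prop := ∀ (datos : List (Int × String × Int × Int × Int)), Dom_menosHuertas datos → Pre_menosHuertas datos → Spec_menosHuertas datos (menosHuertas datos)

-- ===== LEMMAS AND PROOFS =====
-- A's combined fold splits into the three independent per-column folds.
theorem pvFold_split (l : List (Int × String × Int × Int × Int))
    (p q r : String × Int) :
    l.foldl pvStepA ((p.1, q.1, r.1), (p.2, q.2, r.2)) =
      (((l.foldl (fun (p : String × Int) d => if d.2.2.1 < p.2 then (d.2.1, d.2.2.1) else p) p).1,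
       (l.foldl (fun (p : String × Int) d => if d.2.2.2.1 < p.2 then (d.2.1, d.2.2.2.1) else p) q).1,
       (l.foldl (fun (p : String × Int) d => if d.2.2.2.2 < p.2 then (d.2.1, d.2.2.2.2) else p) r).1),
       ((l.foldl (fun (p : String × Int) d => if d.2.2.1 < p.2 then (d.2.1, d.2.2.1) else p) p).2,
       (l.foldl (fun (p : String × Int) d => if d.2.2.2.1 < p.2 then (d.2.1, d.2.2.2.1) else p) q).2,
       (l.foldl (fun (p : String × Int) d => if d.2.2.2.2 < p.2 then (d.2.1, d.2.2.2.2) else p) r).2)) := by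
  induction l generalizing p q r with
  | nil => rfl
  | cons d t ih =>
    simp only [List.foldl_cons, pvStepA]
    split_ifs <;> exact ih _ _ _

-- ===== VERDICT (by name: the statement is the Claim_ definition above) =====
theorem menosHuertas_spec : Claim_equal_menosHuertas := by
  intro datos _ hpre
  unfold Spec_menosHuertas
  match datos with
  | [] => exact absurd rfl hpre
  | d0 :: t =>
    simp only [menosHuertas, menosHuertas_alt, pvScan]
    have h := pvFold_split (d0 :: t) ("", d0.2.2.1) ("", d0.2.2.2.1) ("", d0.2.2.2.2)
    simp only [h]
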